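-- pv_equiv track=rewrite | github.com/music-computing/amads | amads/core/edit.py | insertion_distance
-- ===== SOURCE A (Python) =====
-- from collections import Counter
-- from typing import Iterable
--
-- def insertion_distance(a: Iterable, b: Iterable) -> int | None:
--     """
--     Minimum number of insertions (no deletions) to transform a into b.
--     Returns None if any element in a is not present in b.
--
--     This is the edit distance with only insert operations allowed.
--     Equivalent to: elements in b that are not accounted for by a's multiset.
--
--     Parameters
--     ----------
--     a: Iterable
--         Source sequence.
--     b: Iterable
--         Target sequence.
--
--     Return
--     ------
--     int or None
--         The insertion distance, or None if b's elements don't include all of a's.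
--
--     Examples
--     --------
--     >>> insertion_distance([1, 2, 3], [1, 2, 3, 4, 5])
--     2
--
--     >>> insertion_distance([1, 2, 3], [1, 2, 3])
--     0
--
--     >>> insertion_distance([1, 2, 3], [1, 2]) is None
--     True
--
--     """
--     a = list(a)
--     b = list(b)
--
--     a_counts = Counter(a)
--     b_counts = Counter(b)
--
--     # Check if all elements in a exist in b (can only insert, not create)
--     for elem in a_counts:
--         if elem not in b_counts:
--             return None
--
--     # Insertions = surplus elements in b beyond what a provides
--     insertions = 0
--     for elem, count in b_counts.items():
--         if count > a_counts.get(elem, 0):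
--             insertions += count - a_counts.get(elem, 0)
--
--     return insertions
-- ===== SOURCE B (Python) =====
-- from collections import Counter
--
--
-- def insertion_distance(a, b):
--     """Single-pass greedy: consume a's tokens while scanning b; unmatched b tokens are insertions."""
--     a = list(a)
--     b = list(b)
--
--     remaining = Counter(a)
--     insertions = 0
--     for x in b:
--         if remaining[x] > 0:
--             remaining[x] -= 1
--         else:
--             insertions += 1
--
--     b_set = set(b)
--     for elem in remaining:
--         if elem not in b_set:
--             return None
--
--     return insertions
-- ===== Notes on version B (the rewrite author's own statement) =====
-- stated objective: alternative
-- what changed: Instead of building counters of both a and b and summing per-key surpluses, B builds only Counter(a) and greedily consumes it in a single pass over b's raw tokens, counting unmatched tokens; the membership check uses set(b) instead of Counter(b).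
import Mathlib
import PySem

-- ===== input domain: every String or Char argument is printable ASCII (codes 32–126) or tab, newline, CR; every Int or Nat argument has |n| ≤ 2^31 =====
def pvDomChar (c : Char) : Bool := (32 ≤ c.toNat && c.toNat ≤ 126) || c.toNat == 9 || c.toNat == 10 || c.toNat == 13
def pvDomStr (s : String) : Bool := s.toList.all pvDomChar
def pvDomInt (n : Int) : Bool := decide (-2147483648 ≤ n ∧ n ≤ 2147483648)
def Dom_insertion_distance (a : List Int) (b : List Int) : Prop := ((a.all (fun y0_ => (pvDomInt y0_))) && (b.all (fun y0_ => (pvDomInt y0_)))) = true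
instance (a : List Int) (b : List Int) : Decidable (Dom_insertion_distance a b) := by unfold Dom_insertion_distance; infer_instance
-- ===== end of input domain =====

-- B is an alternative single-pass greedy consumption of Counter(a) over b's raw tokens;
-- A builds both counters and sums per-key surpluses. Proved equal on all inputs (both total).

-- ===== PORT A =====
def insertion_distance (a : List Int) (b : List Int) : Option Int :=
  let a_counts := PySem.Dict.counter a
  let b_counts := PySem.Dict.counter b
  -- for elem in a_counts: if elem not in b_counts: return None
  if a_counts.keys.any (fun e => (b_counts.get? e).isNone) then none
  else
    -- insertions = surplus of b_counts over a_counts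
    let insertions := b_counts.items.foldl
      (fun ins p => if p.2 > a_counts.getD p.1 0 then ins + (p.2 - a_counts.getD p.1 0) else ins) 0
    some insertions

-- ===== PORT B =====
-- one loop step of B: consume a remaining token of x, or count an insertion
def pvStepB (st : PySem.Dict Int Int × Int) (x : Int) : PySem.Dict Int Int × Int :=
  if st.1.getD x 0 > 0 then (st.1.modify x 0 (fun v => v - 1), st.2) else (st.1, st.2 + 1)

def insertion_distance_alt (a : List Int) (b : List Int) : Option Int :=
  let st := b.foldl pvStepB (PySem.Dict.counter a, 0)
  let b_set := PySem.Set.ofList b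
  if st.1.keys.any (fun e => !(decide (e ∈ b_set))) then none
  else some st.2

-- ===== PRECONDITION & SPEC =====
def Spec_insertion_distance (a : List Int) (b : List Int) (out : Option Int) : Prop := out = insertion_distance_alt a b
instance (a : List Int) (b : List Int) (out : Option Int) : Decidable (Spec_insertion_distance a b out) := by unfold Spec_insertion_distance; infer_instance

-- ===== CLAIM (what is proved, stated in full; the proofs are below) =====
def Claim_equal_insertion_distance : Prop := ∀ (a : List Int) (b : List Int), Dom_insertion_distance a b → Spec_insertion_distance a b (insertion_distance a b)

-- ===== LEMMAS AND PROOFS =====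

-- the common value of both surplus computations: sum over the distinct elements of l of max(count in l - g, 0)
def pvSurplus (g : Int → Int) (l : List Int) : Int :=
  ((PySem.Set.ofList l).map (fun k => max ((l.count k : Int) - g k) 0)).sum

theorem pvSet_ofList_append (l : List Int) (x : Int) :
    PySem.Set.ofList (l ++ [x]) = if x ∈ l then PySem.Set.ofList l else PySem.Set.ofList l ++ [x] := by
  have : x ∈ PySem.Set.ofList l ↔ x ∈ l := PySem.Set.mem_ofList l x
  simp [PySem.Set.ofList, List.foldl_append, PySem.Set.add] at this ⊢
  split_ifs with h1 h2 h2 <;> simp_all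

theorem pvSum_ite_single (S : List Int) (x c : Int) (hnd : S.Nodup) (hmem : x ∈ S) :
    (S.map (fun k => if k = x then c else 0)).sum = c := by
  induction S with
  | nil => cases hmem
  | cons y t ih =>
    by_cases hyx : y = x
    · subst hyx
      have hnt : y ∉ t := (List.nodup_cons.mp hnd).1
      have hz : (t.map (fun k => if k = y then c else 0)).sum = 0 := by
        apply List.sum_eq_zero
        intro z hz
        rcases List.mem_map.mp hz with ⟨w, hw, rfl⟩
        have : w ≠ y := fun h' => hnt (h' ▸ hw)
        simp [this]
      simp [hz]
    · have hxt : x ∈ t := by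
        rcases List.mem_cons.mp hmem with h | h
        · exact absurd h.symm hyx
        · exact h
      simp only [List.map_cons, List.sum_cons, hyx, if_false, zero_add]
      exact ih (List.nodup_cons.mp hnd).2 hxt

theorem pvSurplus_append (l : List Int) (x : Int) (g : Int → Int) (hg : 0 ≤ g x) :
    pvSurplus g (l ++ [x]) = pvSurplus g l + (if 0 < g x - l.count x then 0 else 1) := by
  unfold pvSurplus
  rw [pvSet_ofList_append]
  by_cases hx : x ∈ l
  · simp only [hx, if_true]
    have hmapeq : (PySem.Set.ofList l).map (fun k => max (((l ++ [x]).count k : Int) - g k) 0)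
        = (PySem.Set.ofList l).map (fun k =>
            max ((l.count k : Int) - g k) 0 + (if k = x then (if 0 < g x - l.count x then 0 else 1) else 0)) := by
      apply List.map_congr_left
      intro k _
      by_cases hkx : k = x
      · subst hkx
        simp only [List.count_append, List.count_singleton, beq_self_eq_true, if_true]
        push_cast
        split_ifs with h <;> omega
      · have : (l ++ [x]).count k = l.count k := by
          simp [List.count_append, Ne.symm hkx]
        simp [this, hkx]
    rw [hmapeq]
    have hsplit : ∀ (s : List Int),
        (s.map (fun k => max ((l.count k : Int) - g k) 0 + (if k = x then (if 0 < g x - l.count x then 0 else 1) else 0))).sum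
        = (s.map (fun k => max ((l.count k : Int) - g k) 0)).sum
          + (s.map (fun k => if k = x then (if 0 < g x - l.count x then (0:Int) else 1) else 0)).sum := by
      intro s
      induction s with
      | nil => simp
      | cons y t ih => simp; ring
    rw [hsplit, pvSum_ite_single _ x _ (PySem.Set.nodup_ofList l) ((PySem.Set.mem_ofList l x).mpr hx)]
  · simp only [hx, if_false, List.map_append, List.sum_append, List.map_cons, List.map_nil, List.sum_cons, List.sum_nil]
    have hcx : l.count x = 0 := List.count_eq_zero.mpr hx
    have hterm : max (((l ++ [x]).count x : Int) - g x) 0 = (if 0 < g x - l.count x then 0 else 1) := by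
      simp only [List.count_append, List.count_singleton, beq_self_eq_true, if_true, hcx]
      push_cast
      split_ifs with h <;> omega
    have hmapeq : (PySem.Set.ofList l).map (fun k => max (((l ++ [x]).count k : Int) - g k) 0)
        = (PySem.Set.ofList l).map (fun k => max ((l.count k : Int) - g k) 0) := by
      apply List.map_congr_left
      intro k hk
      have hkl : k ∈ l := (PySem.Set.mem_ofList l k).mp hk
      have hkx : k ≠ x := fun h => hx (h ▸ hkl)
      simp [List.count_append, Ne.symm hkx]
    rw [hmapeq, hterm]
    ring

-- the remaining dict's keys are never changed by B's loop
theorem pvStepB_snd (st : PySem.Dict Int Int × Int) (x : Int) :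
    (pvStepB st x).2 = if st.1.getD x 0 > 0 then st.2 else st.2 + 1 := by
  unfold pvStepB; split_ifs <;> rfl

theorem pvKeys_insert_of_mem (d : PySem.Dict Int Int) (x v : Int) (h : x ∈ d.keys) :
    (d.insert x v).keys = d.keys := by
  have hc : d.contains x = true := by
    simp only [PySem.Dict.keys] at h
    rcases List.mem_map.mp h with ⟨p, hp, hfst⟩
    simp only [PySem.Dict.contains, List.any_eq_true]
    exact ⟨p, hp, by simp [hfst]⟩
  simp only [PySem.Dict.insert, hc, if_true, PySem.Dict.keys, List.map_map]
  apply List.map_congr_left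
  intro p _
  by_cases hp : p.1 = x
  · simp [hp]
  · simp [hp]

theorem pvGetD_pos_mem_keys (d : PySem.Dict Int Int) (x : Int) (h : d.getD x 0 > 0) : x ∈ d.keys := by
  by_contra hx
  have := (PySem.Dict.get?_eq_none_iff_not_mem_keys d x).mpr hx
  simp [PySem.Dict.getD, this] at h

theorem pvLoop_keys (b : List Int) (d : PySem.Dict Int Int) (n : Int) :
    (b.foldl pvStepB (d, n)).1.keys = d.keys := by
  induction b generalizing d n with
  | nil => rfl
  | cons x t ih =>
    simp only [List.foldl_cons]
    by_cases h : d.getD x 0 > 0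
    · rw [show pvStepB (d, n) x = (d.modify x 0 (fun v => v - 1), n) from by simp [pvStepB, h]]
      rw [ih]
      exact pvKeys_insert_of_mem d x _ (pvGetD_pos_mem_keys d x h)
    · rw [show pvStepB (d, n) x = (d, n + 1) from by simp [pvStepB, h]]
      exact ih d (n + 1)

theorem pvLoop_getD (b : List Int) (d : PySem.Dict Int Int) (n : Int) (y : Int)
    (hd : ∀ z, 0 ≤ d.getD z 0) :
    (b.foldl pvStepB (d, n)).1.getD y 0 = max (d.getD y 0 - b.count y) 0 := by
  induction b generalizing d n with
  | nil => simp [hd y]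
  | cons x t ih =>
    simp only [List.foldl_cons]
    by_cases h : d.getD x 0 > 0
    · rw [show pvStepB (d, n) x = (d.modify x 0 (fun v => v - 1), n) from by simp [pvStepB, h]]
      rw [ih _ _ (by
        intro z
        rw [PySem.Dict.getD_modify]
        split_ifs with hz
        · omega
        · exact hd z)]
      rw [PySem.Dict.getD_modify]
      by_cases hyx : y = x
      · subst hyx; simp; omega
      · simp [hyx, Ne.symm hyx]
    · rw [show pvStepB (d, n) x = (d, n + 1) from by simp [pvStepB, h]]
      rw [ih d (n+1) hd]
      by_cases hyx : y = x
      · subst hyx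
        have : d.getD y 0 = 0 := le_antisymm (by omega) (hd y)
        simp [this]
      · simp [Ne.symm hyx]

theorem pvLoop_snd (b : List Int) (d : PySem.Dict Int Int) (n : Int)
    (hd : ∀ z, 0 ≤ d.getD z 0) :
    (b.foldl pvStepB (d, n)).2 = n + pvSurplus (fun z => d.getD z 0) b := by
  induction b using List.reverseRecOn with
  | nil => simp [pvSurplus, PySem.Set.ofList, PySem.Set.empty]
  | append_singleton t x ih =>
    rw [List.foldl_append, pvSurplus_append t x _ (hd x)]
    simp only [List.foldl_cons, List.foldl_nil]
    rw [pvStepB_snd, pvLoop_getD t d n x hd, ih]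
    by_cases h : 0 < d.getD x 0 - t.count x
    · have hmax : max (d.getD x 0 - (t.count x : Int)) 0 > 0 := by omega
      have hc : ((t.count x : Int) < d.getD x 0) := by omega
      simp [hmax, hc]
    · have hmax : ¬ (max (d.getD x 0 - (t.count x : Int)) 0 > 0) := by omega
      have hc : ¬ ((t.count x : Int) < d.getD x 0) := by omega
      simp [hmax, hc]
      ring

-- A's surplus fold over the items of Counter(b) computes pvSurplus
theorem pvFoldA (l : List (Int × Int)) (d : PySem.Dict Int Int) (n : Int) :
    l.foldl (fun ins p => if p.2 > d.getD p.1 0 then ins + (p.2 - d.getD p.1 0) else ins) n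
      = n + (l.map (fun p => max (p.2 - d.getD p.1 0) 0)).sum := by
  induction l generalizing n with
  | nil => simp
  | cons p t ih =>
    simp only [List.foldl_cons, List.map_cons, List.sum_cons, ih]
    split_ifs with h
    · omega
    · have : max (p.2 - d.getD p.1 0) 0 = 0 := by omega
      rw [this]; ring

-- ===== VERDICT (by name: the statement is the Claim_ definition above) =====
theorem insertion_distance_spec : Claim_equal_insertion_distance := by
  intro a b _
  unfold Spec_insertion_distance
  have hnn : ∀ z, 0 ≤ (PySem.Dict.counter a).getD z 0 := by
    intro z
    rw [PySem.Dict.getD_counter]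
    exact Int.natCast_nonneg _
  -- the two None-checks agree
  have hkeys : (b.foldl pvStepB (PySem.Dict.counter a, 0)).1.keys = (PySem.Dict.counter a).keys :=
    pvLoop_keys b _ 0
  have hcheck : ((PySem.Dict.counter a).keys.any (fun e => ((PySem.Dict.counter b).get? e).isNone))
      = ((b.foldl pvStepB (PySem.Dict.counter a, 0)).1.keys.any (fun e => !(decide (e ∈ PySem.Set.ofList b)))) := by
    rw [hkeys]
    congr 1
    funext e
    have h1 : (PySem.Dict.counter b).get? e = none ↔ e ∉ (PySem.Dict.counter b).keys :=
      PySem.Dict.get?_eq_none_iff_not_mem_keys _ e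
    rw [PySem.Dict.keys_counter, PySem.Set.mem_ofList] at h1
    by_cases he : e ∈ b
    · have : (PySem.Dict.counter b).get? e ≠ none := fun h => (h1.mp h) he
      cases hh : (PySem.Dict.counter b).get? e with
      | none => exact absurd hh this
      | some v => simp [PySem.Set.mem_ofList, he]
    · have : (PySem.Dict.counter b).get? e = none := h1.mpr he
      simp [this, he, PySem.Set.mem_ofList]
  -- the two insertion counts agree
  have hins : (PySem.Dict.counter b).items.foldl
        (fun ins p => if p.2 > (PySem.Dict.counter a).getD p.1 0 then ins + (p.2 - (PySem.Dict.counter a).getD p.1 0) else ins) 0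
      = (b.foldl pvStepB (PySem.Dict.counter a, 0)).2 := by
    rw [pvFoldA, pvLoop_snd b _ 0 hnn]
    rw [PySem.Dict.items_counter]
    unfold pvSurplus
    rw [List.map_map]
    congr 1
  simp only [insertion_distance, insertion_distance_alt]
  rw [hcheck, hins]
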